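-- pv_equiv track=rewrite | github.com/Alexarcelo/Pagamentos_Guias_Geral | pages/Pagamentos_Fornecedores.py | filtro_tipo_servico_in_out
-- ===== SOURCE A (Python) =====
-- def filtro_tipo_servico_in_out(lista):
--     encontrou_in = False
--     for item in lista:
--         if item == 'IN':
--             encontrou_in = True
--         if item == 'OUT' and encontrou_in:
--             return True
--     return False
-- ===== SOURCE B (Python) =====
-- def filtro_tipo_servico_in_out(lista):
--     if 'IN' not in lista:
--         return False
--     idx = lista.index('IN')
--     return 'OUT' in lista[idx+1:]
-- ===== Notes on version B (the rewrite author's own statement) =====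
-- stated objective: simpler
-- what changed: Replaces the single-pass loop carrying a boolean flag with an anchor-then-tail decomposition: locate the first 'IN' via list.index and test membership of 'OUT' in the slice after it.
import Mathlib
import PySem

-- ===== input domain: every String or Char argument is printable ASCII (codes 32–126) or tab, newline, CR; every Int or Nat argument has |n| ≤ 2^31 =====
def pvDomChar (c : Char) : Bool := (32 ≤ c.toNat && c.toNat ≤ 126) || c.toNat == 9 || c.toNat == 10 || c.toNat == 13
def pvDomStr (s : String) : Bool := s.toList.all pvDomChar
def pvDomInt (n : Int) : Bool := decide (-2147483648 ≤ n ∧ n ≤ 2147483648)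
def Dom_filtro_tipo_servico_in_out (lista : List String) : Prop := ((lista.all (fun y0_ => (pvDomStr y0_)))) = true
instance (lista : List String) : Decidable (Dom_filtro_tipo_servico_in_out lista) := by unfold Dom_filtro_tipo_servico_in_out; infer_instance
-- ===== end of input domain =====

-- B replaces A's flag-carrying single pass with an anchor-then-tail decomposition (index of first 'IN', membership in the slice after it); objective: simpler.


-- ===== PORT A =====
def filtroAuxA : List String → Bool → Bool
  | [], _ => false
  | item :: rest, encontrou_in =>
    let encontrou_in := if item == "IN" then true else encontrou_in
    if item == "OUT" && encontrou_in then true else filtroAuxA rest encontrou_in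

def filtro_tipo_servico_in_out (lista : List String) : Bool :=
  filtroAuxA lista false

-- ===== PORT B =====
def filtro_tipo_servico_in_out_alt (lista : List String) : Bool :=
  if !lista.contains "IN" then false
  else
    match PySem.List.index? lista "IN" with
    | none => false  -- unreachable: guarded by the membership test
    | some idx => (PySem.List.slice lista (some ((idx : Int) + 1)) none).contains "OUT"

-- ===== PRECONDITION & SPEC =====
def Spec_filtro_tipo_servico_in_out (lista : List String) (out : Bool) : Prop := out = filtro_tipo_servico_in_out_alt lista
instance (lista : List String) (out : Bool) : Decidable (Spec_filtro_tipo_servico_in_out lista out) := by unfold Spec_filtro_tipo_servico_in_out; infer_instance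

-- ===== CLAIM (what is proved, stated in full; the proofs are below) =====
def Claim_equal_filtro_tipo_servico_in_out : Prop := ∀ (lista : List String), Dom_filtro_tipo_servico_in_out lista → Spec_filtro_tipo_servico_in_out lista (filtro_tipo_servico_in_out lista)

-- ===== LEMMAS AND PROOFS =====

theorem filtroAuxA_true (l : List String) : filtroAuxA l true = l.contains "OUT" := by
  induction l with
  | nil => simp [filtroAuxA]
  | cons h t ih =>
    simp only [filtroAuxA, List.contains_cons]
    by_cases hOut : h = "OUT"
    · simp [hOut]
    · simp [hOut, Ne.symm hOut, ih]

theorem alt_cons_ne (h : String) (t : List String) (hne : h ≠ "IN") :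
    filtro_tipo_servico_in_out_alt (h :: t) = filtro_tipo_servico_in_out_alt t := by
  unfold filtro_tipo_servico_in_out_alt
  by_cases hmem : "IN" ∈ t
  · obtain ⟨k, hk⟩ := Option.isSome_iff_exists.mp ((PySem.List.index?_isSome_iff t "IN").mpr hmem)
    have hcons : PySem.List.index? (h :: t) "IN" = some (k + 1) := by
      rw [PySem.List.index?_cons_of_ne t hne, hk]; rfl
    have h1 : PySem.List.slice (h :: t) (some ((((k+1) : Nat) : Int) + 1)) none = t.drop (k+1) := by
      have : ((((k+1) : Nat) : Int) + 1) = (((k+2) : Nat) : Int) := by push_cast; ring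
      rw [this, PySem.List.slice_from_natCast]
      simp [List.drop]
    have h2 : PySem.List.slice t (some (((k : Nat) : Int) + 1)) none = t.drop (k+1) := by
      have : (((k : Nat) : Int) + 1) = ((((k+1) : Nat)) : Int) := by push_cast; ring
      rw [this, PySem.List.slice_from_natCast]
    simp only [List.contains_eq_mem, List.mem_cons, hmem, or_true, decide_true,
      Bool.not_true, Bool.false_eq_true, if_false]
    rw [hcons, hk]
    dsimp only
    rw [h1, h2]
  · have : "IN" ∉ (h :: t) := by simp [hmem, Ne.symm hne]
    simp [hmem, this]

theorem alt_cons_in (t : List String) :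
    filtro_tipo_servico_in_out_alt ("IN" :: t) = t.contains "OUT" := by
  unfold filtro_tipo_servico_in_out_alt
  rw [PySem.List.index?_cons_self]
  have hs : PySem.List.slice ("IN" :: t) (some (1 : Int)) none = t := by
    have := PySem.List.slice_from_natCast ("IN" :: t) 1
    simpa using this
  simp only [List.contains_cons, BEq.rfl, Bool.true_or, Bool.not_true, Bool.false_eq_true,
    if_false]
  norm_num [hs]

-- ===== VERDICT (by name: the statement is the Claim_ definition above) =====
theorem filtro_main_eq (lista : List String) :
    filtro_tipo_servico_in_out lista = filtro_tipo_servico_in_out_alt lista := by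
  unfold filtro_tipo_servico_in_out
  induction lista with
  | nil => decide
  | cons h t ih =>
    by_cases hIn : h = "IN"
    · subst hIn
      simp only [filtroAuxA]
      rw [alt_cons_in]
      simp [filtroAuxA_true]
    · simp only [filtroAuxA]
      rw [alt_cons_ne h t hIn]
      by_cases hOut : h = "OUT" <;> simp [hIn, hOut, ih]

theorem filtro_tipo_servico_in_out_spec : Claim_equal_filtro_tipo_servico_in_out := by
  intro lista _
  exact filtro_main_eq lista
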